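-- pv_equiv track=rewrite | github.com/estnltk/estnltk | estnltk/estnltk/vabamorf/morf.py | _split_word_for_syllabification
-- ===== SOURCE A (Python) =====
-- def _split_word_for_syllabification( word_text ):
--     '''
--     Prepares word for syllabification: tokenizes word in a way
--     that dash and slash are separate symbols.
--     '''
--     split_word = [[]]
--     for cid, c in enumerate( word_text ):
--         if c not in ['-', '/']:
--             split_word[-1].append(c)
--         else:
--             if len(split_word[-1]) > 0:
--                 split_word.append([])
--             split_word[-1].append(c)
--             if cid+1 < len(word_text):
--                 split_word.append([])
--     return [''.join(chars) for chars in split_word]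
-- ===== SOURCE B (Python) =====
-- import re
--
-- _TOKEN_RE = re.compile(r'[-/]|[^-/]+')
--
-- def _split_word_for_syllabification(word_text):
--     '''
--     Prepares word for syllabification: tokenizes word in a way
--     that dash and slash are separate symbols.
--     '''
--     return _TOKEN_RE.findall(word_text) or ['']
-- ===== Notes on version B (the rewrite author's own statement) =====
-- stated objective: idiomatic
-- what changed: Replaced the index-tracked character loop with its nested-list accumulator and join pass by a single compiled-regex findall that keeps each dash or slash as its own token and groups the rest into maximal runs (with the singleton-empty-string result for the empty word, matching A).
import Mathlib
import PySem

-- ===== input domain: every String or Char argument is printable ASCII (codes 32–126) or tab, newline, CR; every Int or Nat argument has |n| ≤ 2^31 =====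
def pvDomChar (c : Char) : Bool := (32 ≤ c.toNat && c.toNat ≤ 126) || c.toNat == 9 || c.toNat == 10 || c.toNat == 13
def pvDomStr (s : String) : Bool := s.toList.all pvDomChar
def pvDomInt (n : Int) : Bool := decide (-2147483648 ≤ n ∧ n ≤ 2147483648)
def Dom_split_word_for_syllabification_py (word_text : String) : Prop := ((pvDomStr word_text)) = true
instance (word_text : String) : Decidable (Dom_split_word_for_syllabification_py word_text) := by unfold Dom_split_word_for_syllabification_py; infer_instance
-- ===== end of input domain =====

-- B replaces A's index-tracked loop over a nested-list accumulator by a single regex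
-- tokenization ([-/]|[^-/]+, with [''] for the empty word); same result, more idiomatic.

-- ===== PORT A =====
-- split_word[-1].append(c)  (split_word is never empty in A)
def pvApplast (sw : List (List Char)) (c : Char) : List (List Char) :=
  sw.dropLast ++ [sw.getLastD [] ++ [c]]

-- the for-loop of A: cid is the enumerate counter, n = len(word_text)
def pvGoA (n : Nat) (sw : List (List Char)) (cid : Nat) : List Char → List (List Char)
  | [] => sw
  | c :: rest =>
    if c ≠ '-' ∧ c ≠ '/' then
      pvGoA n (pvApplast sw c) (cid + 1) rest
    else
      let sw1 := if (sw.getLastD []).length > 0 then sw ++ [[]] else sw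
      let sw2 := pvApplast sw1 c
      let sw3 := if cid + 1 < n then sw2 ++ [[]] else sw2
      pvGoA n sw3 (cid + 1) rest

def split_word_for_syllabification_py (word_text : String) : List String :=
  let chars := word_text.toList
  (pvGoA chars.length [[]] 0 chars).map (fun cs => String.ofList cs)

-- ===== PORT B =====
-- hand port of re.findall(r'[-/]|[^-/]+', word_text): exact for this regex on any input,
-- since its matches are each '-'/'/' alone plus maximal runs of other characters
def pvIsDelim (c : Char) : Bool := c = '-' || c = '/'

def pvTokens : List Char → List (List Char)
  | [] => []
  | c :: rest =>
    if pvIsDelim c then [c] :: pvTokens rest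
    else (c :: rest.takeWhile (fun d => !pvIsDelim d)) ::
         pvTokens (rest.dropWhile (fun d => !pvIsDelim d))
termination_by l => l.length
decreasing_by
  · simp
  · have := List.length_dropWhile_le (p := fun d => !pvIsDelim d) (l := rest)
    simp; omega

def split_word_for_syllabification_py_alt (word_text : String) : List String :=
  let toks := pvTokens word_text.toList
  if toks = [] then [""] else toks.map (fun cs => String.ofList cs)

-- ===== PRECONDITION & SPEC =====
def Spec_split_word_for_syllabification_py (word_text : String) (out : List String) : Prop := out = split_word_for_syllabification_py_alt word_text
instance (word_text : String) (out : List String) : Decidable (Spec_split_word_for_syllabification_py word_text out) := by unfold Spec_split_word_for_syllabification_py; infer_instance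

-- ===== CLAIM (what is proved, stated in full; the proofs are below) =====
def Claim_equal_split_word_for_syllabification_py : Prop := ∀ (word_text : String), Dom_split_word_for_syllabification_py word_text → Spec_split_word_for_syllabification_py word_text (split_word_for_syllabification_py word_text)

-- ===== LEMMAS AND PROOFS =====

-- abstract form of A's loop result: cur is the (current) last accumulator
def pvR (cur : List Char) : List Char → List (List Char)
  | [] => [cur]
  | c :: rest =>
    if c ≠ '-' ∧ c ≠ '/' then pvR (cur ++ [c]) rest
    else
      if cur.length > 0 then
        cur :: (if rest = [] then [[c]] else [c] :: pvR [] rest)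
      else
        if rest = [] then [[c]] else [c] :: pvR [] rest

theorem pvApplast_concat (init : List (List Char)) (cur : List Char) (c : Char) :
    pvApplast (init ++ [cur]) c = init ++ [cur ++ [c]] := by
  simp [pvApplast]

theorem pvGoA_eq_pvR (l : List Char) : ∀ (init : List (List Char)) (cur : List Char) (cid : Nat),
    pvGoA (cid + l.length) (init ++ [cur]) cid l = init ++ pvR cur l := by
  induction l with
  | nil => intro init cur cid; simp [pvGoA, pvR]
  | cons c rest ih =>
    intro init cur cid
    by_cases hc : c ≠ '-' ∧ c ≠ '/'
    · rw [show cid + (c :: rest).length = (cid + 1) + rest.length by simp; omega]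
      simp only [pvGoA, pvR, if_pos hc, pvApplast_concat]
      exact ih init (cur ++ [c]) (cid + 1)
    · rw [show cid + (c :: rest).length = (cid + 1) + rest.length by simp; omega]
      simp only [pvGoA, pvR, if_neg hc]
      have hlast : ((init ++ [cur]).getLastD []) = cur := by simp
      by_cases hcur : cur.length > 0
      · simp only [hlast, if_pos hcur]
        rcases rest with _ | ⟨d, rest'⟩
        · have : ¬ ((cid + 1) + ([] : List Char).length > cid + 1) := by simp
          simp [pvGoA, pvApplast]
        · have hlt : cid + 1 < (cid + 1) + (d :: rest').length := by simp
          simp only [if_pos hlt, pvApplast_concat]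
          have := ih (init ++ [cur, [c]]) [] (cid + 1)
          simpa [List.append_assoc] using this
      · simp only [hlast, if_neg hcur]
        have hcurnil : cur = [] := by
          cases cur with
          | nil => rfl
          | cons a t => simp at hcur
        subst hcurnil
        rcases rest with _ | ⟨d, rest'⟩
        · simp [pvGoA, pvApplast_concat]
        · have hlt : cid + 1 < (cid + 1) + (d :: rest').length := by simp
          simp only [if_pos hlt, pvApplast_concat]
          have := ih (init ++ [[c]]) [] (cid + 1)
          simpa [List.append_assoc] using this

theorem pvTokens_ne_nil (c : Char) (l : List Char) : pvTokens (c :: l) ≠ [] := by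
  rw [pvTokens]
  split <;> simp

-- joint characterisation of pvR by pvTokens, by strong induction on length
theorem pvR_tokens (n : Nat) : ∀ (l : List Char), l.length ≤ n →
    (∀ cur : List Char, cur ≠ [] →
        pvR cur l = (cur ++ l.takeWhile (fun d => !pvIsDelim d)) ::
          pvTokens (l.dropWhile (fun d => !pvIsDelim d))) ∧
    (l ≠ [] → pvR [] l = pvTokens l) := by
  induction n with
  | zero =>
    intro l hl
    have : l = [] := by cases l <;> simp_all
    subst this
    refine ⟨fun cur _ => by simp [pvR, pvTokens], fun h => absurd rfl h⟩
  | succ n ih =>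
    intro l hl
    rcases l with _ | ⟨c, rest⟩
    · exact ⟨fun cur _ => by simp [pvR, pvTokens], fun h => absurd rfl h⟩
    · have hrest : rest.length ≤ n := by simp at hl; omega
      have ihr := ih rest hrest
      by_cases hc : c ≠ '-' ∧ c ≠ '/'
      · have hdel : pvIsDelim c = false := by
          simp [pvIsDelim]; exact ⟨hc.1, hc.2⟩
        constructor
        · intro cur hcur
          rw [pvR, if_pos hc]
          have h1 := (ihr.1 (cur ++ [c]) (by simp))
          rw [h1]
          simp [List.takeWhile, List.dropWhile, hdel]
        · intro _
          rw [pvR, if_pos hc]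
          have h1 := (ihr.1 [c] (by simp))
          simp only [List.nil_append]
          rw [h1, pvTokens, if_neg (by simp [hdel])]
          simp
      · have hdel : pvIsDelim c = true := by
          simp [pvIsDelim]
          rcases not_and_or.mp hc with h | h
          · left; simpa using h
          · right; simpa using h
        have htl : List.takeWhile (fun d => !pvIsDelim d) (c :: rest) = [] := by
          simp [List.takeWhile, hdel]
        have hdl : List.dropWhile (fun d => !pvIsDelim d) (c :: rest) = c :: rest := by
          simp [List.dropWhile, hdel]
        have hrec : (if rest = [] then [[c]] else [c] :: pvR [] rest) = pvTokens (c :: rest) := by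
          rcases rest with _ | ⟨d, rest'⟩
          · simp [pvTokens, hdel]
          · rw [if_neg (by simp)]
            rw [pvTokens, if_pos hdel, (ihr.2 (by simp))]
        constructor
        · intro cur hcur
          rw [pvR, if_neg hc, if_pos (by cases cur <;> simp_all)]
          rw [htl, hdl, hrec]
          simp
        · intro _
          rw [pvR, if_neg hc, if_neg (by simp)]
          exact hrec

-- ===== VERDICT (by name: the statement is the Claim_ definition above) =====
theorem split_word_for_syllabification_py_spec : Claim_equal_split_word_for_syllabification_py := by
  intro word_text _
  unfold Spec_split_word_for_syllabification_py
  have h0 := pvGoA_eq_pvR word_text.toList [] [] 0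
  simp only [Nat.zero_add, List.nil_append] at h0
  show (pvGoA word_text.toList.length [[]] 0 word_text.toList).map (fun cs => String.ofList cs) =
    (if pvTokens word_text.toList = [] then [""] else (pvTokens word_text.toList).map (fun cs => String.ofList cs))
  rw [h0]
  rcases hL : word_text.toList with _ | ⟨c, rest⟩
  · simp [pvR, pvTokens]
  · have h2 := (pvR_tokens (c :: rest).length (c :: rest) le_rfl).2 (by simp)
    rw [h2, if_neg (pvTokens_ne_nil c rest)]
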